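-- pv_equiv track=rewrite | github.com/HozyMozy/FYP_Nonogram_Solver | nonogram_solver.py | colToRestriction
-- ===== SOURCE A (Python) =====
-- def colToRestriction(grid, x, R):
--     currentCol = [0]
--     l = 0
--     for i in range(R):
--         if grid[i][x] != 0:
--             currentCol[l] = currentCol[l] + 1
--         else:
--             currentCol.append(0)
--             l += 1
--     currentCol = [i for i in currentCol if i != 0]
--     return currentCol
-- ===== SOURCE B (Python) =====
-- def colToRestriction(grid, x, R):
--     col = [grid[i][x] for i in range(R)]
--     runs = []
--     while col:
--         if col[0] == 0:
--             col = col[1:]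
--         else:
--             run = 0
--             while col and col[0] != 0:
--                 run += 1
--                 col = col[1:]
--             runs.append(run)
--     return runs
-- ===== Notes on version B (the rewrite author's own statement) =====
-- stated objective: idiomatic
-- what changed: B first materialises the column as a list of cell values, then extracts maximal nonzero runs with a group-then-count scan, replacing A's sentinel-zero accumulator with in-place index updates and the final filter pass.
import Mathlib
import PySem

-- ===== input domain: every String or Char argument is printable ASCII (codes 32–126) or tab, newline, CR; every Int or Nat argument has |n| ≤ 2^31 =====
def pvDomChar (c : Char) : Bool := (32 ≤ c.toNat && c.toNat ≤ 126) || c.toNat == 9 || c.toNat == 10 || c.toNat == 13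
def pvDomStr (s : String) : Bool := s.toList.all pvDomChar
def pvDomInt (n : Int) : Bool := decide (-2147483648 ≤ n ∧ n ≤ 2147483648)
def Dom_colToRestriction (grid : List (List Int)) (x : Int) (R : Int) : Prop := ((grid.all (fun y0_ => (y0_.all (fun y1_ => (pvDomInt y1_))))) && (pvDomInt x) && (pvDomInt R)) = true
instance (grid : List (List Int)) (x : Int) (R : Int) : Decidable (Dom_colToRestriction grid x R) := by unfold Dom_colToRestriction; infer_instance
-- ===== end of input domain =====

-- B replaces A's sentinel-zero accumulator (+ final filter) by a run-extraction scan over the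
-- materialised column; same cost, more idiomatic decomposition.

-- ===== PORT A =====
-- grid[i][x] (i a loop index ≥ 0, x possibly negative); shared transliteration of the cell
-- expression both Pythons evaluate.  Outside Pre_ Python raises IndexError; the default 0 is unclaimed there.
def pvCell (grid : List (List Int)) (x : Int) (i : Nat) : Int :=
  ((PySem.List.pyGet? grid (i : Int)).bind (fun row => PySem.List.pyGet? row x)).getD 0

-- one iteration of A's for-loop body, on the state (currentCol, l)
def pvStepA (grid : List (List Int)) (x : Int) (s : List Int × Nat) (i : Nat) : List Int × Nat :=
  if pvCell grid x i ≠ 0 then (s.1.set s.2 (s.1.getD s.2 0 + 1), s.2)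
  else (s.1 ++ [0], s.2 + 1)

def colToRestriction (grid : List (List Int)) (x : Int) (R : Int) : List Int :=
  let st := (List.range R.toNat).foldl (pvStepA grid x) ([0], 0)
  st.1.filter (fun i => i != 0)

-- ===== PORT B =====
-- B's inner while: count the leading nonzero run, return (count, rest)
def pvRun : List Int → Nat → Nat × List Int
  | [], run => (run, [])
  | v :: vs, run => if v ≠ 0 then pvRun vs (run + 1) else (run, v :: vs)

theorem pvRun_len : ∀ (l : List Int) (r : Nat), (pvRun l r).2.length ≤ l.length := by
  intro l
  induction l with
  | nil => intro r; simp [pvRun]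
  | cons v vs ih =>
    intro r
    simp only [pvRun]
    split
    · exact le_trans (ih _) (by simp)
    · simp

-- B's outer while loop over the column
def pvRuns : List Int → List Int
  | [] => []
  | v :: vs =>
    if v = 0 then pvRuns vs
    else
      let p := pvRun (v :: vs) 0
      (p.1 : Int) :: pvRuns p.2
termination_by l => l.length
decreasing_by
  · simp
  · rename_i h
    have h1 : (pvRun (v :: vs) 0).2.length ≤ vs.length := by
      simp only [pvRun, if_pos h]
      exact pvRun_len vs 1
    simp only [List.length_cons]
    omega

def colToRestriction_alt (grid : List (List Int)) (x : Int) (R : Int) : List Int :=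
  let col := (List.range R.toNat).map (pvCell grid x)
  pvRuns col

-- ===== PRECONDITION & SPEC =====
-- Pre_ excludes exactly the inputs where Python A raises IndexError: a row index i < R beyond
-- grid, or column index x invalid (Python rules) for some accessed row.
def Pre_colToRestriction (grid : List (List Int)) (x : Int) (R : Int) : Prop :=
  R.toNat ≤ grid.length ∧ ∀ row ∈ grid.take R.toNat, PySem.Raise.InRange row.length x
instance (grid : List (List Int)) (x : Int) (R : Int) : Decidable (Pre_colToRestriction grid x R) := by
  unfold Pre_colToRestriction; infer_instance

def pvWitness_colToRestriction : List (List Int) × Int × Int := ([[1], [0], [2]], 0, 3)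

def Spec_colToRestriction (grid : List (List Int)) (x : Int) (R : Int) (out : List Int) : Prop := out = colToRestriction_alt grid x R
instance (grid : List (List Int)) (x : Int) (R : Int) (out : List Int) : Decidable (Spec_colToRestriction grid x R out) := by unfold Spec_colToRestriction; infer_instance

-- ===== CLAIM (what is proved, stated in full; the proofs are below) =====
def Claim_equal_colToRestriction : Prop := ∀ (grid : List (List Int)) (x : Int) (R : Int), Dom_colToRestriction grid x R → Pre_colToRestriction grid x R → Spec_colToRestriction grid x R (colToRestriction grid x R)

-- ===== LEMMAS AND PROOFS =====

-- value-level version of A's loop body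
def pvStepV (s : List Int × Nat) (v : Int) : List Int × Nat :=
  if v ≠ 0 then (s.1.set s.2 (s.1.getD s.2 0 + 1), s.2)
  else (s.1 ++ [0], s.2 + 1)

-- proof-side model of A's remaining computation: c = current run counter
def pvAux (c : Int) : List Int → List Int
  | [] => if c ≠ 0 then [c] else []
  | v :: vs => if v ≠ 0 then pvAux (c + 1) vs
               else if c ≠ 0 then c :: pvAux 0 vs else pvAux 0 vs

theorem pvRun_spec : ∀ (l : List Int) (r : Nat),
    pvRun l r = (r + (l.takeWhile (fun v => v != 0)).length, l.dropWhile (fun v => v != 0)) := by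
  intro l
  induction l with
  | nil => intro r; simp [pvRun]
  | cons v vs ih =>
    intro r
    by_cases h : v = 0 <;> simp [pvRun, h, ih]; omega

theorem pvRuns_cons_ne (v : Int) (vs : List Int) (h : v ≠ 0) :
    pvRuns (v :: vs) = ((1 + (vs.takeWhile (fun u => u != 0)).length : Nat) : Int)
      :: pvRuns (vs.dropWhile (fun u => u != 0)) := by
  rw [pvRuns, if_neg h]
  simp [pvRun_spec, h]
  omega

theorem pvAux_spec : ∀ (col : List Int),
    pvAux 0 col = pvRuns col ∧
    ∀ c : Int, 0 < c →
      pvAux c col = (c + ((col.takeWhile (fun v => v != 0)).length : Int))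
        :: pvRuns (col.dropWhile (fun v => v != 0)) := by
  intro col
  induction col with
  | nil =>
    constructor
    · simp [pvAux, pvRuns]
    · intro c hc; simp [pvAux, pvRuns, hc.ne']
  | cons v vs ih =>
    constructor
    · by_cases h : v = 0
      · simp [pvAux, h, pvRuns, ih.1]
      · rw [pvAux, if_pos h]
        simp only [zero_add]
        rw [ih.2 1 one_pos, pvRuns_cons_ne v vs h]
        congr 1
    · intro c hc
      by_cases h : v = 0
      · rw [pvAux, if_neg (by simp [h]), if_pos hc.ne', ih.1]
        simp [h, pvRuns]
      · rw [pvAux, if_pos h, ih.2 (c + 1) (by omega)]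
        have ht : List.takeWhile (fun u => u != 0) (v :: vs)
            = v :: List.takeWhile (fun u => u != 0) vs := by simp [h]
        have hd : List.dropWhile (fun u => u != 0) (v :: vs)
            = List.dropWhile (fun u => u != 0) vs := by simp [h]
        rw [ht, hd]
        congr 1
        simp only [List.length_cons]
        push_cast
        omega

theorem pvFold_spec : ∀ (col acc : List Int) (c : Int),
    ((col.foldl pvStepV (acc ++ [c], acc.length)).1).filter (fun i => i != 0)
      = acc.filter (fun i => i != 0) ++ pvAux c col := by
  intro col
  induction col with
  | nil =>
    intro acc c
    by_cases h : c = 0 <;> simp [pvAux, h, List.filter_append]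
  | cons v vs ih =>
    intro acc c
    by_cases h : v = 0
    · have hstep : pvStepV (acc ++ [c], acc.length) v = ((acc ++ [c]) ++ [0], (acc ++ [c]).length) := by
        simp [pvStepV, h]
      rw [List.foldl_cons, hstep, ih ((acc ++ [c])) 0, pvAux, if_neg (by simp [h])]
      by_cases hc : c = 0 <;> simp [hc, List.filter_append]
    · have hget : (acc ++ [c]).getD acc.length 0 = c := by
        simp [List.getD_eq_getElem?_getD]
      have hset : (acc ++ [c]).set acc.length (c + 1) = acc ++ [c + 1] := by
        rw [List.set_append_right _ _ (le_refl _)]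
        simp
      have hstep : pvStepV (acc ++ [c], acc.length) v = (acc ++ [c + 1], acc.length) := by
        simp [pvStepV, h, hset]
      rw [List.foldl_cons, hstep, ih acc (c + 1), pvAux, if_pos h]

-- ===== VERDICT (by name: the statement is the Claim_ definition above) =====
theorem colToRestriction_spec : Claim_equal_colToRestriction := by
  unfold Claim_equal_colToRestriction
  intro grid x R _ _
  unfold Spec_colToRestriction colToRestriction colToRestriction_alt
  have hmap : (List.range R.toNat).foldl (pvStepA grid x) ([0], 0)
      = ((List.range R.toNat).map (pvCell grid x)).foldl pvStepV ([0], 0) := by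
    rw [List.foldl_map]
    rfl
  rw [hmap]
  have := pvFold_spec ((List.range R.toNat).map (pvCell grid x)) [] 0
  simpa [(pvAux_spec _).1] using this
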